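-- pv_equiv track=rewrite | github.com/Bahuia/HGNet | rules/grammar.py | get_relation_true_name
-- ===== SOURCE A (Python) =====
-- def get_relation_true_name(rel_name, kb="freebase"):
--     if kb == "freebase":
--         return rel_name.replace("ns:", "").replace(".", " ").replace("_", " ")
--     else:
--         rel_name = rel_name.strip("<").strip(">")
--         if rel_name == "http://www.w3.org/1999/02/22-rdf-syntax-ns#type":
--             return "rdf: type"
--         prefix = "http://dbpedia.org/"
--         tmp = rel_name[len(prefix):].split("/")
--         rel_type, rel_true_name = tmp[0], tmp[1]
--         tokens = []
--         last = 0
--         for i, c in enumerate(rel_true_name):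
--             if c.isupper():
--                 tokens.append(rel_true_name[last: i])
--                 last = i
--         tokens.append(rel_true_name[last: len(rel_true_name)])
--         tokens = [rel_type] + [x for x in tokens if x != ""]
--         return " ".join(tokens)
-- ===== SOURCE B (Python) =====
-- def get_relation_true_name(rel_name, kb="freebase"):
--     if kb == "freebase":
--         return rel_name.replace("ns:", "").replace(".", " ").replace("_", " ")
--     rel_name = rel_name.strip("<").strip(">")
--     if rel_name == "http://www.w3.org/1999/02/22-rdf-syntax-ns#type":
--         return "rdf: type"
--     tmp = rel_name[len("http://dbpedia.org/"):].split("/")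
--     rel_type, name = tmp[0], tmp[1]
--     # insert a space before every uppercase letter (except a leading one), in one pass
--     spaced = ''.join(' ' + c if i > 0 and c.isupper() else c
--                      for i, c in enumerate(name))
--     return rel_type + ' ' + spaced if spaced else rel_type
-- ===== Notes on version B (the rewrite author's own statement) =====
-- stated objective: simpler
-- what changed: A's manual index-tracking loop that slices out tokens at uppercase boundaries, filters empties and joins them is replaced by a single pass that emits each character preceded by a space when it is a non-leading uppercase letter.
import Mathlib
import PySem

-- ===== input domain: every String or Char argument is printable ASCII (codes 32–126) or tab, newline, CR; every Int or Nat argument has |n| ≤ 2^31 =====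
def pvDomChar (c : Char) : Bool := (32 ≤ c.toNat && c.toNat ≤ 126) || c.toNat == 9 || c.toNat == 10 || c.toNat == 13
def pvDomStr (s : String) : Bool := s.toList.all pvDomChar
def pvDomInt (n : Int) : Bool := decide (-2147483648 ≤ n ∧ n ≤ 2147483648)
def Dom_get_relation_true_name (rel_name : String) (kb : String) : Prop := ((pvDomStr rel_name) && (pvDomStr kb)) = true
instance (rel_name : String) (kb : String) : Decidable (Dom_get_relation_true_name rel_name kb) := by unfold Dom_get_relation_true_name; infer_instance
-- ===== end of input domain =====

-- B replaces A's index-tracking split-before-uppercase loop by a one-pass "space before each non-leading uppercase letter" scan (objective: simpler).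


-- ===== PORT A =====
-- the body of A's 'for i, c in enumerate(rel_true_name)' loop (state: tokens, last)
def relStep (s : List Char) (acc : List (List Char) × Int) (p : Int × Char) : List (List Char) × Int :=
  if PySem.Chars.isupper p.2 then
    (acc.1 ++ [PySem.List.slice s (some acc.2) (some p.1)], p.1)
  else acc

def relLoop (s : List Char) : List (List Char) × Int :=
  (PySem.List.enumerate s).foldl (relStep s) ([], 0)

def get_relation_true_name (rel_name : String) (kb : String) : String :=
  if kb == "freebase" then
    String.ofList (PySem.Chars.replace (PySem.Chars.replace
      (PySem.Chars.replace rel_name.toList "ns:".toList [])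
      ['.'] [' ']) ['_'] [' '])
  else
    let rn := PySem.Chars.stripChars (PySem.Chars.stripChars rel_name.toList ['<']) ['>']
    if rn = "http://www.w3.org/1999/02/22-rdf-syntax-ns#type".toList then "rdf: type"
    else
      match PySem.Chars.splitOn (PySem.List.slice rn (some 19) none) ['/'] with
      | rel_type :: rel_true_name :: _ =>
        let st := relLoop rel_true_name
        let tokens := st.1 ++ [PySem.List.slice rel_true_name (some st.2) (some (rel_true_name.length : Int))]
        String.ofList (PySem.Chars.join [' '] (rel_type :: tokens.filter (fun x => x ≠ [])))
      | _ => ""   -- Python A raises IndexError (tmp[1]) here; excluded by Pre_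

-- ===== PORT B =====
def get_relation_true_name_alt (rel_name : String) (kb : String) : String :=
  if kb == "freebase" then
    String.ofList (PySem.Chars.replace (PySem.Chars.replace
      (PySem.Chars.replace rel_name.toList "ns:".toList [])
      ['.'] [' ']) ['_'] [' '])
  else
    let rn := PySem.Chars.stripChars (PySem.Chars.stripChars rel_name.toList ['<']) ['>']
    if rn = "http://www.w3.org/1999/02/22-rdf-syntax-ns#type".toList then "rdf: type"
    else
      let tmp := PySem.Chars.splitOn (PySem.List.slice rn (some 19) none) ['/']
      match PySem.List.pyGet? tmp 0, PySem.List.pyGet? tmp 1 with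
      | some rel_type, some name =>
        -- one pass: a space before every non-leading uppercase letter
        let spaced := (PySem.List.enumerate name).foldl
          (fun (acc : List Char) p =>
            acc ++ (if 0 < p.1 && PySem.Chars.isupper p.2 then [' ', p.2] else [p.2])) []
        if spaced = [] then String.ofList rel_type
        else String.ofList (rel_type ++ ' ' :: spaced)
      | _, _ => ""   -- Python B raises here too; excluded by Pre_

-- ===== PRECONDITION & SPEC =====
-- Pre_ excludes exactly the inputs on which Python A raises IndexError on tmp[1]: those taking
-- the else-branch whose stripped relation has no slash separator after the 19-character prefix.
def Pre_get_relation_true_name (rel_name : String) (kb : String) : Prop :=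
  kb = "freebase" ∨
  (let rn := PySem.Chars.stripChars (PySem.Chars.stripChars rel_name.toList ['<']) ['>']
   rn = "http://www.w3.org/1999/02/22-rdf-syntax-ns#type".toList ∨ '/' ∈ rn.drop 19)
instance (rel_name : String) (kb : String) : Decidable (Pre_get_relation_true_name rel_name kb) := by
  unfold Pre_get_relation_true_name; infer_instance

def pvWitness_get_relation_true_name : String × String :=
  ("<http://dbpedia.org/ontology/birthPlace>", "dbpedia")

def Spec_get_relation_true_name (rel_name : String) (kb : String) (out : String) : Prop :=
  out = get_relation_true_name_alt rel_name kb
instance (rel_name : String) (kb : String) (out : String) : Decidable (Spec_get_relation_true_name rel_name kb out) := by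
  unfold Spec_get_relation_true_name; infer_instance

-- ===== CLAIM (what is proved, stated in full; the proofs are below) =====
def Claim_equal_get_relation_true_name : Prop := ∀ (rel_name : String) (kb : String), Dom_get_relation_true_name rel_name kb → Pre_get_relation_true_name rel_name kb → Spec_get_relation_true_name rel_name kb (get_relation_true_name rel_name kb)

-- ===== LEMMAS AND PROOFS =====
theorem slice_app (s : List Char) (c : Char) (a b : Int) (ha : 0 ≤ a) (hb : 0 ≤ b)
    (hb' : b ≤ s.length) :
    PySem.List.slice (s ++ [c]) (some a) (some b) = PySem.List.slice s (some a) (some b) := by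
  rw [PySem.List.slice_toNat _ ha hb, PySem.List.slice_toNat _ ha hb]
  by_cases h : a.toNat ≤ s.length
  · rw [List.drop_append]
    have h0 : a.toNat - s.length = 0 := by omega
    rw [h0]
    simp only [List.drop_zero]
    rw [List.take_append_of_le_length]
    simp; omega
  · have hba : b.toNat - a.toNat = 0 := by omega
    simp [hba]

theorem slice_full (s : List Char) (a : Int) (ha : 0 ≤ a) :
    PySem.List.slice s (some a) (some (s.length : Int)) = s.drop a.toNat := by
  rw [PySem.List.slice_toNat _ ha (by positivity)]
  apply List.take_of_length_le
  simp

theorem fold_congr (ps : List (Int × Char)) (s : List Char) (c : Char) :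
    ∀ (acc : List (List Char) × Int), (∀ p ∈ ps, 0 ≤ p.1 ∧ p.1 ≤ (s.length : Int)) →
    0 ≤ acc.2 → acc.2 ≤ (s.length : Int) →
    ps.foldl (relStep (s ++ [c])) acc = ps.foldl (relStep s) acc := by
  induction ps with
  | nil => intros; rfl
  | cons p ps ih =>
    intro acc hmem h0 h1
    have hp := hmem p (by simp)
    simp only [List.foldl_cons]
    have hstep : relStep (s ++ [c]) acc p = relStep s acc p := by
      unfold relStep
      by_cases hu : PySem.Chars.isupper p.2
      · simp [hu, slice_app s c acc.2 p.1 h0 hp.1 hp.2]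
      · simp [hu]
    rw [hstep]
    apply ih _ (fun q hq => hmem q (by simp [hq]))
    · unfold relStep
      by_cases hu : PySem.Chars.isupper p.2 <;> simp [hu] <;> omega
    · unfold relStep
      by_cases hu : PySem.Chars.isupper p.2 <;> simp [hu] <;> omega

theorem fold_snd_cases (ps : List (Int × Char)) (s : List Char) :
    ∀ acc : List (List Char) × Int,
    (ps.foldl (relStep s) acc).2 = acc.2 ∨ ∃ p ∈ ps, (ps.foldl (relStep s) acc).2 = p.1 := by
  induction ps with
  | nil => intro acc; left; rfl
  | cons p ps ih =>
    intro acc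
    simp only [List.foldl_cons]
    rcases ih (relStep s acc p) with h | ⟨q, hq, h⟩
    · by_cases hu : PySem.Chars.isupper p.2
      · right; refine ⟨p, by simp, ?_⟩; rw [h]; simp [relStep, hu]
      · left; rw [h]; simp [relStep, hu]
    · right; exact ⟨q, by simp [hq], h⟩

theorem enum_mem_bounds (s : List Char) (p : Int × Char) (hp : p ∈ PySem.List.enumerate s) :
    0 ≤ p.1 ∧ p.1 < (s.length : Int) := by
  rcases (PySem.List.mem_enumerate_iff _ _ _).1 hp with ⟨k, hk, rfl⟩
  refine ⟨by simp, ?_⟩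
  simp
  omega

theorem relLoop_snd (s : List Char) :
    0 ≤ (relLoop s).2 ∧ (s ≠ [] → (relLoop s).2 < (s.length : Int)) := by
  rcases fold_snd_cases (PySem.List.enumerate s) s ([], 0) with h | ⟨p, hp, h⟩
  · refine ⟨by rw [relLoop, h], fun hs => ?_⟩
    rw [relLoop, h]
    cases s with
    | nil => exact absurd rfl hs
    | cons a t => simp
  · have := enum_mem_bounds s p hp
    exact ⟨by rw [relLoop, h]; exact this.1, fun _ => by rw [relLoop, h]; exact this.2⟩

theorem relLoop_le (s : List Char) : (relLoop s).2 ≤ (s.length : Int) := by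
  rcases eq_or_ne s [] with rfl | hs
  · exact le_refl 0
  · exact le_of_lt ((relLoop_snd s).2 hs)

theorem relLoop_append (s : List Char) (c : Char) :
    relLoop (s ++ [c]) =
      if PySem.Chars.isupper c then
        ((relLoop s).1 ++ [s.drop (relLoop s).2.toNat], (s.length : Int))
      else relLoop s := by
  have hb := relLoop_snd s
  have hle := relLoop_le s
  have hcongr : List.foldl (relStep (s ++ [c])) ([], 0) (PySem.List.enumerate s) = relLoop s := by
    rw [relLoop]
    apply fold_congr
    · intro p hp; have := enum_mem_bounds s p hp; exact ⟨this.1, le_of_lt this.2⟩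
    · simp
    · simp
  have hstep : relLoop (s ++ [c]) = relStep (s ++ [c]) (relLoop s) (0 + (s.length : Int), c) := by
    rw [relLoop, PySem.List.enumerate_append, List.foldl_append, hcongr]
    simp [PySem.List.enumerate_cons, PySem.List.enumerate_nil]
  rw [hstep, relStep]
  simp only [zero_add]
  by_cases hu : PySem.Chars.isupper c
  · simp only [hu, if_true]
    rw [slice_app s c _ _ hb.1 (by positivity) (by simp), slice_full s _ hb.1]
  · simp [hu]

def specTok (s : List Char) : List Char :=
  match s with
  | [] => []
  | c :: cs => c :: cs.flatMap (fun d => if PySem.Chars.isupper d then [' ', d] else [d])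

theorem specTok_eq_nil_iff (s : List Char) : specTok s = [] ↔ s = [] := by
  cases s <;> simp [specTok]

theorem specTok_append (s : List Char) (c : Char) (hs : s ≠ []) :
    specTok (s ++ [c]) = specTok s ++ (if PySem.Chars.isupper c then [' ', c] else [c]) := by
  cases s with
  | nil => exact absurd rfl hs
  | cons a t => simp [specTok, List.cons_append, List.flatMap_append]

theorem join_cons (sep : List Char) (a : List Char) (xs : List (List Char)) :
    PySem.Chars.join sep (a :: xs) =
      a ++ (if xs = [] then [] else sep ++ PySem.Chars.join sep xs) := by
  cases xs with
  | nil => simp [PySem.Chars.join, List.intercalate]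
  | cons b t =>
    simp [PySem.Chars.join, List.intercalate, List.intersperse]

theorem join_append_singleton (sep : List Char) (xs : List (List Char)) (y : List Char) :
    PySem.Chars.join sep (xs ++ [y]) =
      if xs = [] then y else PySem.Chars.join sep xs ++ sep ++ y := by
  induction xs with
  | nil => simp [join_cons]
  | cons a t ih =>
    rw [List.cons_append, join_cons, ih]
    simp only [List.append_eq_nil_iff, List.cons_ne_nil, and_false, if_false]
    cases t with
    | nil => simp [join_cons]
    | cons b u => simp [join_cons]

def fullToks (s : List Char) : List (List Char) :=
  (relLoop s).1 ++ [PySem.List.slice s (some (relLoop s).2) (some (s.length : Int))]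

theorem fullToks_eq (s : List Char) :
    fullToks s = (relLoop s).1 ++ [s.drop (relLoop s).2.toNat] := by
  rw [fullToks, slice_full s _ (relLoop_snd s).1]

theorem fullToks_append (s : List Char) (c : Char) :
    fullToks (s ++ [c]) =
      if PySem.Chars.isupper c then fullToks s ++ [[c]]
      else (relLoop s).1 ++ [s.drop (relLoop s).2.toNat ++ [c]] := by
  have h0 := (relLoop_snd s).1
  have hle := relLoop_le s
  by_cases hu : PySem.Chars.isupper c
  · rw [fullToks, relLoop_append, if_pos hu, if_pos hu, fullToks_eq]
    show ((relLoop s).1 ++ [s.drop (relLoop s).2.toNat]) ++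
        [PySem.List.slice (s ++ [c]) (some (s.length : Int)) (some ((s ++ [c]).length : Int))] = _
    rw [slice_full _ _ (by positivity)]
    simp
  · rw [fullToks, relLoop_append, if_neg hu, if_neg hu]
    show (relLoop s).1 ++
        [PySem.List.slice (s ++ [c]) (some (relLoop s).2) (some ((s ++ [c]).length : Int))] = _
    rw [slice_full _ _ h0, List.drop_append]
    have h2 : (relLoop s).2.toNat - s.length = 0 := by omega
    simp [h2]

theorem join_ne_nil (xs : List (List Char)) (hx : xs ≠ [])
    (h : ∀ x ∈ xs, x ≠ []) : PySem.Chars.join [' '] xs ≠ [] := by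
  cases xs with
  | nil => exact absurd rfl hx
  | cons a t =>
    rw [join_cons]
    have ha := h a (by simp)
    intro hc
    rcases List.append_eq_nil_iff.1 hc with ⟨h1, _⟩
    exact ha h1

theorem core (s : List Char) :
    PySem.Chars.join [' '] ((fullToks s).filter (fun x => x ≠ [])) = specTok s := by
  induction s using List.reverseRecOn with
  | nil => rfl
  | append_singleton s c ih =>
    rcases eq_or_ne s [] with rfl | hs
    · -- single character
      simp only [List.nil_append]
      rw [show fullToks [c] = fullToks ([] ++ [c]) from rfl, fullToks_append]
      by_cases hu : PySem.Chars.isupper c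
      · rw [if_pos hu]
        simp [fullToks, relLoop, specTok, join_cons, PySem.List.slice]
      · rw [if_neg hu]
        simp [relLoop, specTok, join_cons]
    · have hlt := (relLoop_snd s).2 hs
      have h0 := (relLoop_snd s).1
      have hd : s.drop (relLoop s).2.toNat ≠ [] := by
        intro hc
        rw [List.drop_eq_nil_iff] at hc
        omega
      have hFne : specTok s ≠ [] := by
        intro hc; exact hs ((specTok_eq_nil_iff s).1 hc)
      have hfilter_ne : (fullToks s).filter (fun x => x ≠ []) ≠ [] := by
        intro hc
        apply hFne
        rw [← ih, hc]
        rfl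
      rw [fullToks_append]
      by_cases hu : PySem.Chars.isupper c
      · rw [if_pos hu, List.filter_append]
        have : List.filter (fun x => decide (x ≠ [])) [[c]] = [[c]] := by simp
        rw [this, join_append_singleton]
        rw [if_neg hfilter_ne, ih, specTok_append s c hs, if_pos hu]
        simp
      · rw [if_neg hu]
        have hform : (fullToks s).filter (fun x => decide (x ≠ [])) =
            ((relLoop s).1.filter (fun x => decide (x ≠ []))) ++ [s.drop (relLoop s).2.toNat] := by
          rw [fullToks_eq, List.filter_append]
          congr 1
          simp [hd]
        have hform2 : ((relLoop s).1 ++ [s.drop (relLoop s).2.toNat ++ [c]]).filter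
            (fun x => decide (x ≠ [])) =
            ((relLoop s).1.filter (fun x => decide (x ≠ []))) ++ [s.drop (relLoop s).2.toNat ++ [c]] := by
          rw [List.filter_append]
          congr 1
          simp
        rw [hform2, join_append_singleton, specTok_append s c hs, if_neg hu, ← ih, hform,
          join_append_singleton]
        by_cases ht : (relLoop s).1.filter (fun x => decide (x ≠ [])) = []
        · rw [if_pos ht, if_pos ht]
        · rw [if_neg ht, if_neg ht]
          simp

theorem flatMap_enum (cs : List Char) : ∀ k : Int, 1 ≤ k →
    (PySem.List.enumerate cs k).flatMap
      (fun p => if 0 < p.1 && PySem.Chars.isupper p.2 then [' ', p.2] else [p.2]) =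
    cs.flatMap (fun d => if PySem.Chars.isupper d then [' ', d] else [d]) := by
  induction cs with
  | nil => intro k _; simp [PySem.List.enumerate_nil]
  | cons c cs ih =>
    intro k hk
    rw [PySem.List.enumerate_cons, List.flatMap_cons, List.flatMap_cons, ih (k + 1) (by omega)]
    congr 1
    have hk' : (0 < k) = True := by simp; omega
    by_cases hu : PySem.Chars.isupper c <;> simp [hu, hk']

theorem spacedFold_eq (s : List Char) :
    (PySem.List.enumerate s).foldl
      (fun (acc : List Char) p =>
        acc ++ (if 0 < p.1 && PySem.Chars.isupper p.2 then [' ', p.2] else [p.2])) [] =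
    specTok s := by
  rw [PySem.List.foldl_append_eq_flatMap]
  cases s with
  | nil => simp [PySem.List.enumerate_nil, specTok]
  | cons c cs =>
    rw [PySem.List.enumerate_cons, List.flatMap_cons]
    simp only [zero_add]
    rw [flatMap_enum cs 1 (by omega)]
    simp [specTok]

theorem arm_eq (rel_type s : List Char) :
    String.ofList (PySem.Chars.join [' ']
      (rel_type :: ((relLoop s).1 ++
        [PySem.List.slice s (some (relLoop s).2) (some (s.length : Int))]).filter (fun x => x ≠ []))) =
    (if ((PySem.List.enumerate s).foldl
          (fun (acc : List Char) p =>
            acc ++ (if 0 < p.1 && PySem.Chars.isupper p.2 then [' ', p.2] else [p.2])) []) = []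
     then String.ofList rel_type
     else String.ofList (rel_type ++ ' ' ::
        ((PySem.List.enumerate s).foldl
          (fun (acc : List Char) p =>
            acc ++ (if 0 < p.1 && PySem.Chars.isupper p.2 then [' ', p.2] else [p.2])) []))) := by
  rw [spacedFold_eq]
  have hcore := core s
  show String.ofList (PySem.Chars.join [' '] (rel_type :: (fullToks s).filter (fun x => x ≠ []))) = _
  rw [join_cons]
  by_cases hsp : specTok s = []
  · have hfil : (fullToks s).filter (fun x => x ≠ []) = [] := by
      by_contra hne
      exact (join_ne_nil _ hne (fun x hx => by simpa using (List.mem_filter.1 hx).2))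
        (hcore.trans hsp)
    rw [if_pos hfil, if_pos hsp]
    simp
  · have hfil : (fullToks s).filter (fun x => x ≠ []) ≠ [] := by
      intro hc
      apply hsp
      rw [← hcore, hc]
      rfl
    rw [if_neg hfil, if_neg hsp, hcore]
    simp

theorem branch_eq (rnl : List Char) :
    (if rnl = "http://www.w3.org/1999/02/22-rdf-syntax-ns#type".toList then ("rdf: type" : String)
     else
      match PySem.Chars.splitOn (PySem.List.slice rnl (some 19) none) ['/'] with
      | rel_type :: rel_true_name :: _ =>
        let st := relLoop rel_true_name
        let tokens := st.1 ++ [PySem.List.slice rel_true_name (some st.2) (some (rel_true_name.length : Int))]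
        String.ofList (PySem.Chars.join [' '] (rel_type :: tokens.filter (fun x => x ≠ [])))
      | _ => "") =
    (if rnl = "http://www.w3.org/1999/02/22-rdf-syntax-ns#type".toList then ("rdf: type" : String)
     else
      let tmp := PySem.Chars.splitOn (PySem.List.slice rnl (some 19) none) ['/']
      match PySem.List.pyGet? tmp 0, PySem.List.pyGet? tmp 1 with
      | some rel_type, some name =>
        let spaced := (PySem.List.enumerate name).foldl
          (fun (acc : List Char) p =>
            acc ++ (if 0 < p.1 && PySem.Chars.isupper p.2 then [' ', p.2] else [p.2])) []
        if spaced = [] then String.ofList rel_type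
        else String.ofList (rel_type ++ ' ' :: spaced)
      | _, _ => "") := by
  by_cases hrdf : rnl = "http://www.w3.org/1999/02/22-rdf-syntax-ns#type".toList
  · rw [if_pos hrdf, if_pos hrdf]
  · rw [if_neg hrdf, if_neg hrdf]
    cases h : PySem.Chars.splitOn (PySem.List.slice rnl (some 19) none) ['/'] with
    | nil => simp [PySem.List.pyGet?, PySem.List.pyIdx?]
    | cons t0 rest =>
      cases rest with
      | nil => simp [PySem.List.pyGet?, PySem.List.pyIdx?]
      | cons t1 rest' =>
        have hpos : (0:Int) ≤ (rest'.length : Int) + 1 := by positivity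
        have h0 : PySem.List.pyGet? (t0 :: t1 :: rest') 0 = some t0 := by
          simp [PySem.List.pyGet?, PySem.List.pyIdx?, hpos]
        have h1 : PySem.List.pyGet? (t0 :: t1 :: rest') 1 = some t1 := by
          simp [PySem.List.pyGet?, PySem.List.pyIdx?]
        simp only [h0, h1]
        exact arm_eq t0 t1

theorem main_eq (rel_name kb : String) :
    get_relation_true_name rel_name kb = get_relation_true_name_alt rel_name kb := by
  unfold get_relation_true_name get_relation_true_name_alt
  by_cases hkb : (kb == "freebase") = true
  · rw [if_pos hkb, if_pos hkb]
  · rw [if_neg hkb, if_neg hkb]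
    exact branch_eq (PySem.Chars.stripChars (PySem.Chars.stripChars rel_name.toList ['<']) ['>'])

-- ===== VERDICT (by name: the statement is the Claim_ definition above) =====
theorem get_relation_true_name_spec : Claim_equal_get_relation_true_name := by
  intro rel_name kb _ _
  unfold Spec_get_relation_true_name
  exact main_eq rel_name kb
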